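-- pv_equiv track=rewrite | github.com/Chunkys0up7/ISLayer | tests/unit/test_journey_builder.py | _make_capsule_data
-- ===== SOURCE A (Python) =====
-- def _make_capsule_data(adj: dict) -> dict:
--     """Convert simple adjacency dict {"A": ["B"], "B": []} to capsule_data format."""
--     # Build predecessor map from successor map
--     predecessors = {k: [] for k in adj}
--     for src, succs in adj.items():
--         for tgt in succs:
--             if tgt in predecessors:
--                 predecessors[tgt].append(src)
--
--     return {
--         k: {"successor_ids": v, "predecessor_ids": predecessors.get(k, [])}
--         for k, v in adj.items()
--     }
-- ===== SOURCE B (Python) =====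
-- def _make_capsule_data(adj: dict) -> dict:
--     """Convert simple adjacency dict {"A": ["B"], "B": []} to capsule_data format."""
--     # No separate predecessor map: compute each node's predecessors by a direct scan.
--     return {
--         k: {
--             "successor_ids": v,
--             "predecessor_ids": [src for src, succs in adj.items() for t in succs if t == k],
--         }
--         for k, v in adj.items()
--     }
-- ===== Notes on version B (the rewrite author's own statement) =====
-- stated objective: simpler
-- what changed: Drops A's mutable predecessor-map inversion pass entirely; a single dict comprehension recomputes each node's predecessors by scanning all adjacency entries for occurrences of that node.
import Mathlib
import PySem

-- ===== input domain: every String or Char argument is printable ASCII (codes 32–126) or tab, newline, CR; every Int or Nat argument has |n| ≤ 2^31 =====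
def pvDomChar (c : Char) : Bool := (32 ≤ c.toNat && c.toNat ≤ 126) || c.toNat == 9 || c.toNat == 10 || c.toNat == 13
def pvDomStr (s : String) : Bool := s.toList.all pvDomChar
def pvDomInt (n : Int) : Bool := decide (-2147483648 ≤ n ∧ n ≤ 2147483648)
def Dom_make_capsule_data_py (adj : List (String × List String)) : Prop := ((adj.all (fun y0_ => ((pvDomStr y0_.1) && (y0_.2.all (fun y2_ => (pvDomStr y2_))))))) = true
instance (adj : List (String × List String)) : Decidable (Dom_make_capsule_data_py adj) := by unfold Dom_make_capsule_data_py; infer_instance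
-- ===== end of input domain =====

-- B drops A's predecessor-map inversion pass; each node's predecessors are recomputed by a
-- direct scan over all adjacency entries inside one comprehension (simpler, not faster).


-- ===== PORT A =====
def make_capsule_data_py (adj : List (String × List String)) : List (String × List (String × List String)) :=
  -- predecessors = {k: [] for k in adj}
  let preds0 : PySem.Dict String (List String) :=
    adj.foldl (fun d p => d.insert p.1 []) PySem.Dict.empty
  -- for src, succs in adj.items(): for tgt in succs: if tgt in predecessors: predecessors[tgt].append(src)
  let preds : PySem.Dict String (List String) :=
    adj.foldl (fun d p =>
      p.2.foldl (fun d tgt =>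
        if d.contains tgt then d.modify tgt [] (fun l => l ++ [p.1]) else d) d) preds0
  -- {k: {"successor_ids": v, "predecessor_ids": predecessors.get(k, [])} for k, v in adj.items()}
  adj.map (fun p => (p.1, [("successor_ids", p.2), ("predecessor_ids", preds.getD p.1 [])]))

-- ===== PORT B =====
-- [src for src, succs in adj.items() for t in succs if t == k]
def pyB_preds (adj : List (String × List String)) (k : String) : List String :=
  adj.foldl (fun acc q => q.2.foldl (fun acc t => if t == k then acc ++ [q.1] else acc) acc) []

def make_capsule_data_py_alt (adj : List (String × List String)) : List (String × List (String × List String)) :=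
  adj.map (fun p => (p.1, [("successor_ids", p.2), ("predecessor_ids", pyB_preds adj p.1)]))

-- ===== PRECONDITION & SPEC =====
def Spec_make_capsule_data_py (adj : List (String × List String)) (out : List (String × List (String × List String))) : Prop := out = make_capsule_data_py_alt adj
instance (adj : List (String × List String)) (out : List (String × List (String × List String))) : Decidable (Spec_make_capsule_data_py adj out) := by unfold Spec_make_capsule_data_py; infer_instance

-- ===== CLAIM (what is proved, stated in full; the proofs are below) =====
def Claim_equal_make_capsule_data_py : Prop := ∀ (adj : List (String × List String)), Dom_make_capsule_data_py adj → Spec_make_capsule_data_py adj (make_capsule_data_py adj)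

-- ===== LEMMAS AND PROOFS =====

-- predecessors[k] collected over one successor list (A's inner loop):
-- contains is unchanged, and getD k gains one src per occurrence of k (only if k is a key).
theorem innerA_contains (src : String) (succs : List String)
    (d : PySem.Dict String (List String)) (x : String) :
    (succs.foldl (fun d tgt =>
      if d.contains tgt then d.modify tgt [] (fun l => l ++ [src]) else d) d).contains x
      = d.contains x := by
  induction succs generalizing d with
  | nil => rfl
  | cons t rest ih =>
    simp only [List.foldl_cons]
    by_cases h : d.contains t
    · simp only [h, if_true, ih, PySem.Dict.contains_modify]
      by_cases hx : x == t
      · have hxt : x = t := by simpa using hx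
        simp [hxt, h]
      · simp [hx]
    · simp [h, ih]

theorem innerA_getD (src : String) (succs : List String)
    (d : PySem.Dict String (List String)) (k : String) :
    (succs.foldl (fun d tgt =>
      if d.contains tgt then d.modify tgt [] (fun l => l ++ [src]) else d) d).getD k []
      = d.getD k [] ++
        (if d.contains k then (succs.filter (fun t => t == k)).map (fun _ => src) else []) := by
  induction succs generalizing d with
  | nil => simp
  | cons t rest ih =>
    simp only [List.foldl_cons, List.filter_cons]
    by_cases h : d.contains t
    · simp only [h, if_true, ih]
      rw [PySem.Dict.getD_modify]
      simp only [PySem.Dict.contains_modify]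
      by_cases hk : k = t
      · subst hk
        simp [h, List.append_assoc]
      · have hbk : (t == k) = false := by simpa using (Ne.symm hk)
        simp only [hk, if_false, hbk]
        by_cases hc : d.contains k <;> simp [hc, hk]
    · simp only [h, ih]
      by_cases hk : k = t
      · subst hk; simp [h]
      · have hbk : (t == k) = false := by simpa using (Ne.symm hk)
        simp [hbk]

-- A's whole edge-inversion loop: for a key k already in d, getD k gains exactly the
-- sources of all edges into k, in adjacency order.
theorem outerA_getD (l : List (String × List String))
    (d : PySem.Dict String (List String)) (k : String) (hk : d.contains k = true) :
    (l.foldl (fun d p =>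
      p.2.foldl (fun d tgt =>
        if d.contains tgt then d.modify tgt [] (fun l => l ++ [p.1]) else d) d) d).getD k []
      = d.getD k [] ++ l.flatMap (fun q => (q.2.filter (fun t => t == k)).map (fun _ => q.1)) := by
  induction l generalizing d with
  | nil => simp
  | cons q rest ih =>
    simp only [List.foldl_cons, List.flatMap_cons]
    rw [ih _ (by rw [innerA_contains]; exact hk), innerA_getD]
    simp [hk, List.append_assoc]

-- preds0 contains exactly the keys of adj
theorem preds0_contains (adj : List (String × List String))
    (d : PySem.Dict String (List String)) (x : String) :
    (adj.foldl (fun d p => d.insert p.1 ([] : List String)) d).contains x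
      = (d.contains x || adj.any (fun p => p.1 == x)) := by
  induction adj generalizing d with
  | nil => simp
  | cons q rest ih =>
    simp only [List.foldl_cons, List.any_cons]
    rw [ih, PySem.Dict.contains_insert]
    by_cases h : x = q.1
    · subst h; simp
    · have h1 : (x == q.1) = false := by simpa using h
      have h2 : (q.1 == x) = false := by simpa using (Ne.symm h)
      simp [h1, h2]

-- and every value in preds0 is []
theorem preds0_getD (adj : List (String × List String))
    (d : PySem.Dict String (List String)) (hd : ∀ x, d.getD x [] = []) (x : String) :
    (adj.foldl (fun d p => d.insert p.1 ([] : List String)) d).getD x [] = [] := by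
  induction adj generalizing d with
  | nil => exact hd x
  | cons q rest ih =>
    simp only [List.foldl_cons]
    exact ih _ (fun y => by rw [PySem.Dict.getD_insert]; split <;> simp [hd])

-- B's scan for k is the same flatMap
theorem pyB_preds_eq (adj : List (String × List String)) (k : String) :
    pyB_preds adj k
      = adj.flatMap (fun q => (q.2.filter (fun t => t == k)).map (fun _ => q.1)) := by
  unfold pyB_preds
  have h : ∀ (q : String × List String) (acc : List String),
      q.2.foldl (fun acc t => if t == k then acc ++ [q.1] else acc) acc
        = acc ++ (q.2.filter (fun t => t == k)).map (fun _ => q.1) := by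
    intro q acc
    exact PySem.List.foldl_append_if (fun t => t == k) (fun _ => q.1) q.2 acc
  calc adj.foldl (fun acc q => q.2.foldl (fun acc t => if t == k then acc ++ [q.1] else acc) acc) []
      = adj.foldl (fun acc q => acc ++ (q.2.filter (fun t => t == k)).map (fun _ => q.1)) [] :=
        PySem.List.foldl_congr_mem _ _ _ _ (fun acc q _ => h q acc)
    _ = _ := by
        rw [PySem.List.foldl_append_eq_flatMap]; simp

-- ===== VERDICT (by name: the statement is the Claim_ definition above) =====
theorem make_capsule_data_py_spec : Claim_equal_make_capsule_data_py := by
  intro adj _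
  unfold Spec_make_capsule_data_py make_capsule_data_py make_capsule_data_py_alt
  apply List.map_congr_left
  intro p hp
  have hc : (adj.foldl (fun d p => d.insert p.1 ([] : List String))
      PySem.Dict.empty).contains p.1 = true := by
    rw [preds0_contains]
    simp only [Bool.or_eq_true, List.any_eq_true]
    exact Or.inr ⟨p, hp, by simp⟩
  rw [outerA_getD _ _ _ hc, preds0_getD _ _ (fun x => by simp), pyB_preds_eq]
  simp
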